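-- pv_equiv track=rewrite | github.com/Code-ZYJ/Leecode_everyday | 解码字母到整数映射.py | freqAlphabets
-- ===== SOURCE A (Python) =====
-- def freqAlphabets(s):
--     """
--     :type s: str
--     :rtype: str
--     """
--     def get(st):
--         return chr(int(st) + 96)
--     i, ans = 0, ""
--     while i < len(s):
--         if i + 2 < len(s) and s[i + 2] == '#':
--             ans += get(s[i: i + 2])
--             i += 2
--         else:
--             ans += get(s[i])
--         i += 1
--     return ans
--
-- s = "10#11#12"
-- ===== SOURCE B (Python) =====
-- def freqAlphabets(s):
--     """
--     :type s: str
--     :rtype: str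
--     """
--     parts = s.split('#')
--     out = []
--     for k in range(len(parts)):
--         p = parts[k]
--         if k < len(parts) - 1:
--             for c in p[:-2]:
--                 out.append(chr(int(c) + 96))
--             out.append(chr(int(p[-2:]) + 96))
--         else:
--             for c in p:
--                 out.append(chr(int(c) + 96))
--     return ''.join(out)
-- ===== Notes on version B (the rewrite author's own statement) =====
-- stated objective: alternative
-- what changed: Replaces A's single forward index scan with two-character lookahead (s[i+2]=='#') by two staged passes: split the string on '#', then decode each non-last part as single digits followed by one two-digit token (its last two characters), and the last part as singles only.
-- outside the precondition, e.g. on freqAlphabets('#'): A raises ValueError, B raises ValueError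
import Mathlib
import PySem

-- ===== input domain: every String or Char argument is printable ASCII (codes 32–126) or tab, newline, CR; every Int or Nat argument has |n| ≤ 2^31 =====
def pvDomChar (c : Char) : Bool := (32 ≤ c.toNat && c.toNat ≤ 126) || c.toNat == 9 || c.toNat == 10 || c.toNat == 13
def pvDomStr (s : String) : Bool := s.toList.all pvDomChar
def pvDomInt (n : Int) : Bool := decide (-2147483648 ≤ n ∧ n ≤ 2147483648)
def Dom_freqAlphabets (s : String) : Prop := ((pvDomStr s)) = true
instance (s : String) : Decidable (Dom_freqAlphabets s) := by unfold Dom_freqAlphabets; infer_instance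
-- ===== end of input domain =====

set_option maxRecDepth 100000
set_option maxHeartbeats 1000000

-- B re-implements the decoder in two staged passes: split the string on '#', then decode each
-- non-last part as single digits followed by one two-digit token (its last two characters);
-- same return value on Pre_, no speed claim.

-- ===== PORT A =====
-- chr(int(st) + 96); none = int() raised ValueError
def pvGetTok? (cs : List Char) : Option Char :=
  (PySem.Int.ofChars? cs).map (fun n => Char.ofNat (n + 96).toNat)

-- A's forward while-loop: at index i, if i+2 < len(s) and s[i+2] == '#', consume s[i:i+2]
-- and the '#' (i += 3), else consume the single character s[i]; ans += decoded token.
def pvGoA : List Char → Option (List Char)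
  | a :: b :: '#' :: rest =>
      match pvGetTok? [a, b], pvGoA rest with
      | some c, some r => some (c :: r)
      | _, _ => none
  | c0 :: rest =>
      match pvGetTok? [c0], pvGoA rest with
      | some c, some r => some (c :: r)
      | _, _ => none
  | [] => some []

def freqAlphabets (s : String) : String := String.ofList ((pvGoA s.toList).getD [])

-- ===== PORT B =====
-- chr(int(st) + 96) as B writes it inline; none = int() raised ValueError
def pvDec? (cs : List Char) : Option Char :=
  match PySem.Int.ofChars? cs with
  | some n => some (Char.ofNat (n + 96).toNat)
  | none => none

-- B's inner 'for c in …: out.append(chr(int(c) + 96))' loop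
def pvSingles? : List Char → Option (List Char)
  | [] => some []
  | c :: rest =>
      match pvDec? [c], pvSingles? rest with
      | some t, some r => some (t :: r)
      | _, _ => none

-- B's loop over parts = s.split('#'): a part with k < len(parts)-1 contributes its
-- characters p[:-2] as singles plus the two-digit token p[-2:]; the last part is all singles.
def pvPartsB? : List (List Char) → Option (List Char)
  | [] => some []
  | [p] => pvSingles? p
  | p :: q :: t =>
      match pvSingles? (PySem.List.slice p none (some (-2))),
            pvDec? (PySem.List.slice p (some (-2)) none),
            pvPartsB? (q :: t) with
      | some u, some tok, some r => some (u ++ tok :: r)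
      | _, _, _ => none

def freqAlphabets_alt (s : String) : String :=
  String.ofList ((pvPartsB? (PySem.Chars.splitOn s.toList ['#'])).getD [])

-- ===== PRECONDITION & SPEC =====
-- character at index i, with the harmless filler ' ' (not a digit, not '#') out of range
abbrev pvAt (cs : List Char) (i : Nat) : Char := cs.getD i ' '
abbrev pvWsC (c : Char) : Bool := c == ' ' || c == '\t' || c == '\n' || c == '\r'
-- the two-character strings Python's int() accepts (within the ASCII input domain)
abbrev pvValid2 (a b : Char) : Bool :=
  (a.isDigit && b.isDigit) || ((a == '+' || a == '-' || pvWsC a) && b.isDigit) || (a.isDigit && pvWsC b)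

-- Pre_: exactly the inputs on which A returns normally (int() never raises): every '#' sits
-- at the end of a three-character chunk whose first two characters int() accepts, and every
-- character outside such chunks is a digit.
def Pre_freqAlphabets (s : String) : Prop :=
  (∀ i, i < s.toList.length → pvAt s.toList i = '#' →
      2 ≤ i ∧ pvValid2 (pvAt s.toList (i - 2)) (pvAt s.toList (i - 1)) = true) ∧
  (∀ i, i < s.toList.length → pvAt s.toList i ≠ '#' → pvAt s.toList (i + 1) ≠ '#' →
      pvAt s.toList (i + 2) ≠ '#' → (pvAt s.toList i).isDigit = true)
instance (s : String) : Decidable (Pre_freqAlphabets s) := by unfold Pre_freqAlphabets; infer_instance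

def pvWitness_freqAlphabets : String := "10#11#12"

def Spec_freqAlphabets (s : String) (out : String) : Prop := out = freqAlphabets_alt s
instance (s : String) (out : String) : Decidable (Spec_freqAlphabets s out) := by unfold Spec_freqAlphabets; infer_instance

-- ===== CLAIM (what is proved, stated in full; the proofs are below) =====
def Claim_equal_freqAlphabets : Prop := ∀ (s : String), Dom_freqAlphabets s → Pre_freqAlphabets s → Spec_freqAlphabets s (freqAlphabets s)

-- ===== LEMMAS AND PROOFS =====

-- Pre_, read on the character list
def PreL (cs : List Char) : Prop :=
  (∀ i, i < cs.length → pvAt cs i = '#' →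
      2 ≤ i ∧ pvValid2 (pvAt cs (i - 2)) (pvAt cs (i - 1)) = true) ∧
  (∀ i, i < cs.length → pvAt cs i ≠ '#' → pvAt cs (i + 1) ≠ '#' →
      pvAt cs (i + 2) ≠ '#' → (pvAt cs i).isDigit = true)

theorem digit_mem (c : Char) (h : c.isDigit = true) :
    c ∈ ['0','1','2','3','4','5','6','7','8','9'] := by
  have h1 : 48 ≤ c.toNat := by
    have := (Bool.and_eq_true ..).mp h |>.1
    simpa [Char.le_def, UInt32.le_iff_toNat_le] using of_decide_eq_true this
  have h2 : c.toNat ≤ 57 := by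
    have := (Bool.and_eq_true ..).mp h |>.2
    simpa [Char.le_def, UInt32.le_iff_toNat_le] using of_decide_eq_true this
  have hc : Char.ofNat c.toNat = c := Char.ofNat_toNat c
  interval_cases hn : c.toNat <;> subst hc <;> decide

theorem wsC_cases (c : Char) (h : pvWsC c = true) : c = ' ' ∨ c = '\t' ∨ c = '\n' ∨ c = '\r' := by
  rcases Bool.or_eq_true_iff.mp h with h | h
  · rcases Bool.or_eq_true_iff.mp h with h | h
    · rcases Bool.or_eq_true_iff.mp h with h | h
      · exact Or.inl (eq_of_beq h)
      · exact Or.inr (Or.inl (eq_of_beq h))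
    · exact Or.inr (Or.inr (Or.inl (eq_of_beq h)))
  · exact Or.inr (Or.inr (Or.inr (eq_of_beq h)))

-- B's decoder computes the same Option as A's helper
theorem dec_eq_tok (cs : List Char) : pvDec? cs = pvGetTok? cs := by
  cases h : PySem.Int.ofChars? cs <;> simp [pvDec?, pvGetTok?, h]

theorem tok1_some (c : Char) (h : c.isDigit = true) : ∃ t, pvGetTok? [c] = some t := by
  have := digit_mem c h
  fin_cases this <;> exact ⟨_, rfl⟩

theorem pairs_ok : ((['0','1','2','3','4','5','6','7','8','9','+','-',' ','\t','\n','\r']).all fun a =>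
    (['0','1','2','3','4','5','6','7','8','9',' ','\t','\n','\r']).all fun b =>
      !pvValid2 a b || (pvGetTok? [a,b]).isSome) = true := by decide

theorem tok2_some (a b : Char) (h : pvValid2 a b = true) : ∃ t, pvGetTok? [a, b] = some t := by
  have ha : a ∈ ['0','1','2','3','4','5','6','7','8','9','+','-',' ','\t','\n','\r'] := by
    rcases Bool.or_eq_true_iff.mp h with h' | h'
    rcases Bool.or_eq_true_iff.mp h' with h' | h'
    · have := digit_mem a ((Bool.and_eq_true ..).mp h').1
      simp only [List.mem_cons, List.not_mem_nil, or_false] at this ⊢; tauto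
    · have h1 := ((Bool.and_eq_true ..).mp h').1
      rcases Bool.or_eq_true_iff.mp h1 with h2 | h2
      · rcases Bool.or_eq_true_iff.mp h2 with h3 | h3
        · rw [eq_of_beq h3]; decide
        · rw [eq_of_beq h3]; decide
      · rcases wsC_cases a h2 with h3|h3|h3|h3 <;> rw [h3] <;> decide
    · have := digit_mem a ((Bool.and_eq_true ..).mp h').1
      simp only [List.mem_cons, List.not_mem_nil, or_false] at this ⊢; tauto
  have hb : b ∈ ['0','1','2','3','4','5','6','7','8','9',' ','\t','\n','\r'] := by
    rcases Bool.or_eq_true_iff.mp h with h' | h'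
    rcases Bool.or_eq_true_iff.mp h' with h' | h'
    · have := digit_mem b ((Bool.and_eq_true ..).mp h').2
      simp only [List.mem_cons, List.not_mem_nil, or_false] at this ⊢; tauto
    · have := digit_mem b ((Bool.and_eq_true ..).mp h').2
      simp only [List.mem_cons, List.not_mem_nil, or_false] at this ⊢; tauto
    · rcases wsC_cases b ((Bool.and_eq_true ..).mp h').2 with h3|h3|h3|h3 <;> rw [h3] <;> decide
  have h1 := List.all_eq_true.mp (List.all_eq_true.mp pairs_ok a ha) b hb
  rcases Bool.or_eq_true_iff.mp h1 with h2 | h2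
  · rw [h] at h2; cases h2
  · exact Option.isSome_iff_exists.mp h2

theorem valid2_hash_right (x : Char) : pvValid2 x '#' = false := by
  have h1 : ('#' : Char).isDigit = false := by decide
  have h2 : pvWsC '#' = false := by decide
  simp [pvValid2, h1, h2]

theorem valid2_hash_left (x : Char) : pvValid2 '#' x = false := by
  have h1 : ('#' : Char).isDigit = false := by decide
  have h2 : pvWsC '#' = false := by decide
  simp [pvValid2, h1, h2]

theorem pvAt_s1 (a : Char) (l : List Char) (k : Nat) : pvAt (a :: l) (k + 1) = pvAt l k := by
  simp [pvAt]

theorem pvAt_s3 (a b c : Char) (l : List Char) (k : Nat) : pvAt (a :: b :: c :: l) (k + 3) = pvAt l k := by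
  simp [pvAt]

theorem preL_drop3 (a b : Char) (rest : List Char) (h : PreL (a :: b :: '#' :: rest)) :
    PreL rest := by
  obtain ⟨h1, h2⟩ := h
  constructor
  · intro j hj hash
    have hj3 : j + 3 < (a :: b :: '#' :: rest).length := by simp; omega
    have hsh : pvAt (a :: b :: '#' :: rest) (j + 3) = '#' := by rw [pvAt_s3]; exact hash
    obtain ⟨-, hv⟩ := h1 (j + 3) hj3 hsh
    have hjge : 2 ≤ j := by
      by_contra hlt
      simp only [not_le] at hlt
      interval_cases j
      · rw [show (0:Nat) + 3 - 2 = 1 by rfl, show (0:Nat) + 3 - 1 = 2 by rfl] at hv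
        rw [show pvAt (a :: b :: '#' :: rest) 2 = '#' by rfl] at hv
        rw [valid2_hash_right] at hv
        cases hv
      · rw [show (1:Nat) + 3 - 2 = 2 by rfl, show (1:Nat) + 3 - 1 = 3 by rfl] at hv
        rw [show pvAt (a :: b :: '#' :: rest) 2 = '#' by rfl] at hv
        rw [valid2_hash_left] at hv
        cases hv
    refine ⟨hjge, ?_⟩
    obtain ⟨k, rfl⟩ : ∃ k, j = k + 2 := ⟨j - 2, by omega⟩
    have e1 : k + 2 + 3 - 2 = k + 3 := by omega
    have e2 : k + 2 + 3 - 1 = (k + 1) + 3 := by omega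
    rw [e1, e2, pvAt_s3, pvAt_s3] at hv
    simpa using hv
  · intro j hj hne hne1 hne2
    have hj3 : j + 3 < (a :: b :: '#' :: rest).length := by simp; omega
    have := h2 (j + 3) hj3 (by rw [pvAt_s3]; exact hne)
      (by rw [show j + 3 + 1 = (j+1) + 3 by omega, pvAt_s3]; exact hne1)
      (by rw [show j + 3 + 2 = (j+2) + 3 by omega, pvAt_s3]; exact hne2)
    rwa [pvAt_s3] at this

theorem preL_tail (c0 : Char) (rest : List Char) (h : PreL (c0 :: rest))
    (h0 : pvAt rest 0 ≠ '#') (h1 : pvAt rest 1 ≠ '#') : PreL rest := by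
  obtain ⟨ha, hb⟩ := h
  constructor
  · intro j hj hash
    have hj1 : j + 1 < (c0 :: rest).length := by simp; omega
    obtain ⟨hge, hv⟩ := ha (j + 1) hj1 (by rw [pvAt_s1]; exact hash)
    have hjge : 2 ≤ j := by
      rcases Nat.lt_or_ge j 2 with hlt | hge'
      · interval_cases j
        · exact absurd hash h0
        · exact absurd hash h1
      · exact hge'
    refine ⟨hjge, ?_⟩
    obtain ⟨k, rfl⟩ : ∃ k, j = k + 2 := ⟨j - 2, by omega⟩
    have e1 : k + 2 + 1 - 2 = k + 1 := by omega
    have e2 : k + 2 + 1 - 1 = (k + 1) + 1 := by omega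
    rw [e1, e2, pvAt_s1, pvAt_s1] at hv
    simpa using hv
  · intro j hj hne hne1 hne2
    have hj1 : j + 1 < (c0 :: rest).length := by simp; omega
    have := hb (j + 1) hj1 (by rw [pvAt_s1]; exact hne)
      (by rw [show j + 1 + 1 = (j+1) + 1 by omega, pvAt_s1]; exact hne1)
      (by rw [show j + 1 + 2 = (j+2) + 1 by omega, pvAt_s1]; exact hne2)
    rwa [pvAt_s1] at this

-- proof-side structural model of s.split('#')
def pvSplitF : List Char → List Char → List (List Char)
  | cur, [] => [cur.reverse]
  | cur, c :: rest => if c = '#' then cur.reverse :: pvSplitF [] rest else pvSplitF (c :: cur) rest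

theorem splitOn_go_eq : ∀ (fuel : Nat) (l cur : List Char) (accL : List (List Char)),
    l.length < fuel → PySem.Chars.splitOn.go ['#'] fuel l cur accL = accL.reverse ++ pvSplitF cur l := by
  intro fuel
  induction fuel with
  | zero => intro l cur accL h; omega
  | succ f ih =>
    intro l cur accL h
    cases l with
    | nil =>
      rw [PySem.Chars.splitOn.go.eq_def]
      simp [pvSplitF]
    | cons c rest =>
      rw [PySem.Chars.splitOn.go.eq_def]
      simp only
      by_cases hc : c = '#'
      · subst hc
        rw [if_pos (by simp [List.isPrefixOf])]
        rw [show List.drop (['#'] : List Char).length ('#' :: rest) = rest from rfl]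
        rw [ih rest [] (cur.reverse :: accL) (by simp at h ⊢; omega)]
        simp [pvSplitF]
      · rw [if_neg (by simp [List.isPrefixOf]; intro h'; exact hc h'.symm)]
        rw [ih rest (c :: cur) accL (by simp at h ⊢; omega)]
        rw [pvSplitF, if_neg hc]

theorem splitOn_eq (cs : List Char) : PySem.Chars.splitOn cs ['#'] = pvSplitF [] cs := by
  unfold PySem.Chars.splitOn
  rw [splitOn_go_eq (cs.length + 1) cs [] [] (by omega)]
  rfl

-- pvSplitF [] l is nonempty and pvSplitF cur l prepends cur.reverse onto its head
theorem splitF_cons (l : List Char) :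
    ∃ h t, pvSplitF [] l = h :: t ∧ ∀ cur : List Char, pvSplitF cur l = (cur.reverse ++ h) :: t := by
  induction l with
  | nil => exact ⟨[], [], rfl, fun cur => by simp [pvSplitF]⟩
  | cons c rest ih =>
    by_cases hc : c = '#'
    · subst hc
      exact ⟨[], pvSplitF [] rest, by simp [pvSplitF], fun cur => by simp [pvSplitF]⟩
    · obtain ⟨h, t, h1, h2⟩ := ih
      refine ⟨c :: h, t, ?_, ?_⟩
      · rw [pvSplitF, if_neg hc, h2 [c]]; rfl
      · intro cur
        rw [pvSplitF, if_neg hc, h2 (c :: cur)]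
        simp

-- xs[:-2] and xs[-2:] peel a leading element off a list of length ≥ 3
theorem slice_to2_cons (c : Char) (p : List Char) (h : 2 ≤ p.length) :
    PySem.List.slice (c :: p) none (some (-2)) = c :: PySem.List.slice p none (some (-2)) := by
  rw [PySem.List.slice_to_neg_ofNat _ 2 (by norm_num), PySem.List.slice_to_neg_ofNat _ 2 (by norm_num)]
  have e : (c :: p).length - 2 = (p.length - 2) + 1 := by simp; omega
  rw [e, List.take_succ_cons]

theorem slice_from2_cons (c : Char) (p : List Char) (h : 2 ≤ p.length) :
    PySem.List.slice (c :: p) (some (-2)) none = PySem.List.slice p (some (-2)) none := by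
  rw [PySem.List.slice_from_neg_ofNat _ 2 (by norm_num), PySem.List.slice_from_neg_ofNat _ 2 (by norm_num)]
  have e : (c :: p).length - 2 = (p.length - 2) + 1 := by simp; omega
  rw [e, List.drop_succ_cons]

theorem main_lemma : ∀ (n : Nat) (cs : List Char), cs.length ≤ n → PreL cs →
    ∃ r, pvGoA cs = some r ∧ pvPartsB? (pvSplitF [] cs) = some r := by
  intro n
  induction n with
  | zero =>
    intro cs hlen _
    have : cs = [] := List.eq_nil_of_length_eq_zero (Nat.le_zero.mp hlen)
    subst this
    exact ⟨[], by rw [pvGoA.eq_3], by simp [pvSplitF, pvPartsB?, pvSingles?]⟩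
  | succ n ih =>
    intro cs hlen hpre
    rcases cs with _ | ⟨c0, cs1⟩
    · exact ⟨[], by rw [pvGoA.eq_3], by simp [pvSplitF, pvPartsB?, pvSingles?]⟩
    have hc0 : c0 ≠ '#' := by
      intro hc
      have := (hpre.1 0 (by simp) (by simpa [pvAt] using hc)).1
      omega
    rcases cs1 with _ | ⟨c1, cs2⟩
    · -- [c0]
      have hdig : c0.isDigit = true := by
        have := hpre.2 0 (by simp) (by simpa [pvAt] using hc0)
          (by simp [pvAt]) (by simp [pvAt])
        simpa [pvAt] using this
      obtain ⟨t, ht⟩ := tok1_some c0 hdig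
      refine ⟨[t], ?_, ?_⟩
      · rw [pvGoA.eq_2 c0 [] (by intro _ _ hh; cases hh), ht, pvGoA.eq_3]
      · rw [show pvSplitF [] [c0] = [[c0]] by simp [pvSplitF, hc0]]
        rw [show pvPartsB? [[c0]] = pvSingles? [c0] from rfl]
        rw [pvSingles?, dec_eq_tok, ht, pvSingles?]
    rcases cs2 with _ | ⟨c2, cs3⟩
    · -- [c0, c1]
      have hc1 : c1 ≠ '#' := by
        intro hc
        have := (hpre.1 1 (by simp) (by simpa [pvAt] using hc)).1
        omega
      have hd0 : c0.isDigit = true := by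
        have := hpre.2 0 (by simp) (by simpa [pvAt] using hc0)
          (by simpa [pvAt] using hc1) (by simp [pvAt])
        simpa [pvAt] using this
      have hd1 : c1.isDigit = true := by
        have := hpre.2 1 (by simp) (by simpa [pvAt] using hc1)
          (by simp [pvAt]) (by simp [pvAt])
        simpa [pvAt] using this
      obtain ⟨t0, ht0⟩ := tok1_some c0 hd0
      obtain ⟨t1, ht1⟩ := tok1_some c1 hd1
      refine ⟨[t0, t1], ?_, ?_⟩
      · rw [pvGoA.eq_2 c0 [c1] (by intro b r1 hh; cases hh), ht0,
          pvGoA.eq_2 c1 [] (by intro _ _ hh; cases hh), ht1, pvGoA.eq_3]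
      · rw [show pvSplitF [] [c0, c1] = [[c0, c1]] by simp [pvSplitF, hc0, hc1]]
        rw [show pvPartsB? [[c0, c1]] = pvSingles? [c0, c1] from rfl]
        rw [pvSingles?, dec_eq_tok, ht0, pvSingles?, dec_eq_tok, ht1, pvSingles?]
    by_cases h2 : c2 = '#'
    · -- block c0 c1 '#'
      subst h2
      have hc1 : c1 ≠ '#' := by
        intro hc
        have := (hpre.1 1 (by simp) (by simpa [pvAt] using hc)).1
        omega
      obtain ⟨-, hv⟩ := hpre.1 2 (by simp) (by rfl)
      have hv' : pvValid2 c0 c1 = true := by simpa [pvAt] using hv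
      obtain ⟨t, ht⟩ := tok2_some c0 c1 hv'
      have hrest : PreL cs3 := preL_drop3 c0 c1 cs3 hpre
      obtain ⟨r, hA, hB⟩ := ih cs3 (by simp at hlen; omega) hrest
      obtain ⟨h, tl, hsplit, -⟩ := splitF_cons cs3
      refine ⟨t :: r, ?_, ?_⟩
      · rw [pvGoA.eq_1, ht, hA]
      · have hsp : pvSplitF [] (c0 :: c1 :: '#' :: cs3) = [c0, c1] :: h :: tl := by
          simp [pvSplitF, hc0, hc1, hsplit]
        rw [hsp, pvPartsB?.eq_3]
        rw [show PySem.List.slice [c0, c1] none (some (-2)) = [] by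
          rw [PySem.List.slice_to_neg_ofNat _ 2 (by norm_num)]; rfl]
        rw [show PySem.List.slice [c0, c1] (some (-2)) none = [c0, c1] by
          rw [PySem.List.slice_from_neg_ofNat _ 2 (by norm_num)]; rfl]
        rw [pvSingles?, dec_eq_tok, ht]
        rw [hsplit] at hB
        rw [hB]
        rfl
    · -- c2 ≠ '#': A consumes the single c0
      have hc1 : c1 ≠ '#' := by
        intro hc
        have := (hpre.1 1 (by simp) (by simpa [pvAt] using hc)).1
        omega
      have hd0 : c0.isDigit = true := by
        have := hpre.2 0 (by simp) (by simpa [pvAt] using hc0)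
          (by simpa [pvAt] using hc1) (by simpa [pvAt] using h2)
        simpa [pvAt] using this
      obtain ⟨t, ht⟩ := tok1_some c0 hd0
      have hrest : PreL (c1 :: c2 :: cs3) :=
        preL_tail c0 (c1 :: c2 :: cs3) hpre (by simpa [pvAt] using hc1) (by simpa [pvAt] using h2)
      obtain ⟨r, hA, hB⟩ := ih (c1 :: c2 :: cs3) (by simp at hlen ⊢; omega) hrest
      obtain ⟨h, tl, hsplit3, hgen⟩ := splitF_cons cs3
      have hspRest : pvSplitF [] (c1 :: c2 :: cs3) = (c1 :: c2 :: h) :: tl := by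
        simp [pvSplitF, hc1, h2, hgen [c2, c1]]
      have hspAll : pvSplitF [] (c0 :: c1 :: c2 :: cs3) = (c0 :: c1 :: c2 :: h) :: tl := by
        simp [pvSplitF, hc0, hc1, h2, hgen [c2, c1, c0]]
      rw [hspRest] at hB
      refine ⟨t :: r, ?_, ?_⟩
      · rw [pvGoA.eq_2 c0 (c1 :: c2 :: cs3)
          (by intro b r1 hh; injection hh with hh1 hh2; injection hh2 with hh3 hh4; exact h2 hh3),
          ht, hA]
      · rw [hspAll]
        cases tl with
        | nil =>
          rw [show pvPartsB? [c0 :: c1 :: c2 :: h] = pvSingles? (c0 :: c1 :: c2 :: h) from rfl]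
          rw [show pvPartsB? [c1 :: c2 :: h] = pvSingles? (c1 :: c2 :: h) from rfl] at hB
          rw [pvSingles?, dec_eq_tok, ht, hB]
        | cons q tl' =>
          rw [pvPartsB?.eq_3] at hB ⊢
          rw [slice_to2_cons c0 (c1 :: c2 :: h) (by simp), slice_from2_cons c0 (c1 :: c2 :: h) (by simp)]
          cases hu : pvSingles? (PySem.List.slice (c1 :: c2 :: h) none (some (-2))) with
          | none => rw [hu] at hB; simp at hB
          | some u =>
            rw [hu] at hB
            cases htk : pvDec? (PySem.List.slice (c1 :: c2 :: h) (some (-2)) none) with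
            | none => rw [htk] at hB; simp at hB
            | some tk =>
              rw [htk] at hB
              cases hrr : pvPartsB? (q :: tl') with
              | none => rw [hrr] at hB; simp at hB
              | some rr =>
                rw [hrr] at hB
                simp only [Option.some.injEq] at hB
                simp [pvSingles?, dec_eq_tok, ht, hu, ← hB]

-- ===== VERDICT (by name: the statement is the Claim_ definition above) =====
theorem freqAlphabets_spec : Claim_equal_freqAlphabets := by
  intro s _ hpre
  unfold Spec_freqAlphabets freqAlphabets freqAlphabets_alt
  obtain ⟨r, hA, hB⟩ := main_lemma s.toList.length s.toList le_rfl hpre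
  rw [hA, splitOn_eq, hB]
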